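-- pv_equiv track=rewrite | github.com/0815Sailsman/AdventOfCode | Python/2021/07/main.py | calc_costs_to
-- ===== SOURCE A (Python) =====
-- def calc_costs_to(positions, target, mode):
--     cost = 0
--     for pos in positions:
--         if mode == 1:
--             cost += abs(pos - target)
--         elif mode == 2:
--             cost += inflate(abs(pos - target))
--     return cost
--
-- def inflate(temp_steps):
--     cost = 0
--     counter = 1
--     for step in range(temp_steps):
--         cost += counter
--         counter += 1
--     return cost
-- ===== SOURCE B (Python) =====
-- def calc_costs_to(positions, target, mode):
--     if mode == 1:
--         return sum(abs(p - target) for p in positions)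
--     if mode == 2:
--         return sum(abs(p - target) * (abs(p - target) + 1) // 2 for p in positions)
--     return 0
-- ===== Notes on version B (the rewrite author's own statement) =====
-- stated objective: faster
-- what changed: Replaces the per-position inflate loop (summing 1..d step by step) with the closed-form triangular number d*(d+1)//2, and the accumulator loop with per-mode sum() of a generator.
import Mathlib
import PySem

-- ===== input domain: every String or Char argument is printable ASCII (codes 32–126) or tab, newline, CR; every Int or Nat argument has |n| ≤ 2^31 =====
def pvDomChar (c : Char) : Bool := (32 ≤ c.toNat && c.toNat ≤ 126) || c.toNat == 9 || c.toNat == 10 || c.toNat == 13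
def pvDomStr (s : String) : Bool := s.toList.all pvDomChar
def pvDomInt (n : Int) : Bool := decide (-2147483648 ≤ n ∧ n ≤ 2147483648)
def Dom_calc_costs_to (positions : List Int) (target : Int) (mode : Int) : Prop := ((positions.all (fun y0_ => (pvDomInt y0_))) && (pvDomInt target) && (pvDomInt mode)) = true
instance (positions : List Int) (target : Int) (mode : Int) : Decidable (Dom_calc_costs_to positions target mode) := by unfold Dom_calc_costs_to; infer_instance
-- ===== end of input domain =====

-- ===== PORT A =====
-- inflate: cost=0, counter=1; for step in range(temp_steps): cost+=counter; counter+=1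
def inflatePy (temp_steps : Int) : Int :=
  ((PySem.List.pyRange 0 temp_steps 1).foldl
    (fun (s : Int × Int) _ => (s.1 + s.2, s.2 + 1)) (0, 1)).1

def calc_costs_to (positions : List Int) (target : Int) (mode : Int) : Int :=
  positions.foldl
    (fun cost pos =>
      if mode = 1 then cost + |pos - target|
      else if mode = 2 then cost + inflatePy |pos - target|
      else cost) 0

-- ===== PORT B =====
-- B: per-mode sum with the closed-form triangular cost d*(d+1)//2
def calc_costs_to_alt (positions : List Int) (target : Int) (mode : Int) : Int :=
  if mode = 1 then (positions.map (fun p => |p - target|)).sum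
  else if mode = 2 then
    (positions.map (fun p => PySem.Int.floordiv (|p - target| * (|p - target| + 1)) 2)).sum
  else 0

-- ===== PRECONDITION & SPEC =====
def Spec_calc_costs_to (positions : List Int) (target : Int) (mode : Int) (out : Int) : Prop := out = calc_costs_to_alt positions target mode
instance (positions : List Int) (target : Int) (mode : Int) (out : Int) : Decidable (Spec_calc_costs_to positions target mode out) := by unfold Spec_calc_costs_to; infer_instance

-- ===== CLAIM (what is proved, stated in full; the proofs are below) =====
def Claim_equal_calc_costs_to : Prop := ∀ (positions : List Int) (target : Int) (mode : Int), Dom_calc_costs_to positions target mode → Spec_calc_costs_to positions target mode (calc_costs_to positions target mode)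

-- ===== LEMMAS AND PROOFS =====


lemma fold_state (m : Nat) :
    (PySem.List.pyRange 0 m 1).foldl (fun (s : Int × Int) _ => (s.1 + s.2, s.2 + 1)) (0, 1)
      = ((m : Int) * (m + 1) / 2, (m : Int) + 1) := by
  induction m with
  | zero => simp [PySem.List.pyRange_one_eq_nil]
  | succ k ih =>
    rw [show ((k + 1 : Nat) : Int) = (k : Int) + 1 by push_cast; ring,
        PySem.List.pyRange_one_succ_right (by positivity)]
    rw [List.foldl_append, ih]
    simp only [List.foldl_cons, List.foldl_nil]
    refine Prod.ext ?_ (by ring)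
    simp only
    have hk : 2 ∣ (k : Int) * ((k : Int) + 1) := (Int.even_mul_succ_self (k : Int)).two_dvd
    have hk1 : 2 ∣ ((k : Int) + 1) * ((k : Int) + 1 + 1) := (Int.even_mul_succ_self ((k : Int) + 1)).two_dvd
    have hde : ((k : Int) + 1) * ((k : Int) + 1 + 1) = (k : Int) * ((k : Int) + 1) + 2 * ((k : Int) + 1) := by ring
    omega

lemma inflate_tri (n : Int) (hn : 0 ≤ n) :
    inflatePy n = PySem.Int.floordiv (n * (n + 1)) 2 := by
  obtain ⟨m, rfl⟩ := Int.eq_ofNat_of_zero_le hn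
  unfold inflatePy
  rw [fold_state]
  rw [PySem.Int.floordiv_eq_ediv_of_pos (by norm_num)]

lemma foldl_add_map (f : Int → Int) (l : List Int) (init : Int) :
    l.foldl (fun c p => c + f p) init = init + (l.map f).sum := by
  induction l generalizing init with
  | nil => simp
  | cons a t ih => simp [ih]; ring

theorem calc_costs_to_spec : Claim_equal_calc_costs_to := by
  intro positions target mode _
  unfold Spec_calc_costs_to calc_costs_to calc_costs_to_alt
  by_cases h1 : mode = 1
  · subst h1
    simp only [reduceIte]
    rw [foldl_add_map]; ring
  · by_cases h2 : mode = 2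
    · subst h2
      simp only [reduceIte, OfNat.ofNat_ne_one]
      have : ∀ (l : List Int) (init : Int),
          l.foldl (fun cost pos => cost + inflatePy |pos - target|) init
            = init + (l.map (fun p => PySem.Int.floordiv (|p - target| * (|p - target| + 1)) 2)).sum := by
        intro l init
        rw [foldl_add_map (fun p => inflatePy |p - target|)]
        congr 1
        refine congrArg _ (List.map_congr_left fun p _ => ?_)
        exact inflate_tri _ (abs_nonneg _)
      rw [this, zero_add]
    · simp [h1, h2]
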